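-- pv_equiv track=rewrite | github.com/AlperHuseyn/cita-uiauto-engine | uiauto/recorder.py | _fix_yaml_list_indent
-- ===== SOURCE A (Python) =====
-- def _fix_yaml_list_indent(yaml_str: str) -> str:
--     """
--     Fix YAML list indentation to match desired format.
--
--     Converts:
--         locators:
--         - name: foo
--         control_type: Bar
--
--     To:
--         locators:
--         - name: foo
--             control_type:  Bar
--     """
--     lines = yaml_str. split('\n')
--     result = []
--     i = 0
--
--     while i < len(lines):
--         line = lines[i]
--         stripped = line.lstrip()
--
--         # Check if this is a list item
--         if stripped.startswith('- '):
--             # Calculate current indentation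
--             current_indent = len(line) - len(stripped)
--
--             # Add 2 extra spaces to the list item
--             result.append(' ' * current_indent + '  ' + stripped)
--
--             # Process continuation lines (same dict, more indented than the "- ")
--             i += 1
--             while i < len(lines):
--                 next_line = lines[i]
--                 if not next_line.strip():  # Empty line
--                     result.append(next_line)
--                     i += 1
--                     continue
--
--                 next_stripped = next_line.lstrip()
--                 next_indent = len(next_line) - len(next_stripped)
--
--                 # If it's more indented than the list item marker and not a new list item
--                 if next_indent > current_indent and not next_stripped.startswith('- '):
--                     # Add 2 extra spaces
--                     result.append(' ' * next_indent + '  ' + next_stripped)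
--                     i += 1
--                 else:
--                     # Not a continuation, break and let outer loop handle it
--                     break
--         else:
--             result. append(line)
--             i += 1
--
--     return '\n'.join(result)
-- ===== SOURCE B (Python) =====
-- def _fix_yaml_list_indent(yaml_str: str) -> str:
--     """Single-pass state machine: track the indent of the current list-item
--     marker (or None) instead of A's nested index-driven while loops."""
--     out = []
--     list_indent = None  # indent of the current '- ' item, None when outside one
--     for line in yaml_str.split('\n'):
--         if not line.strip():  # blank line: keep it, stay in the current item
--             out.append(line)
--             continue
--         stripped = line.lstrip()
--         indent = len(line) - len(stripped)
--         if stripped.startswith('- '):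
--             out.append(' ' * indent + '  ' + stripped)
--             list_indent = indent
--         elif list_indent is not None and indent > list_indent:
--             # continuation line of the current list item
--             out.append(' ' * indent + '  ' + stripped)
--         else:
--             out.append(line)
--             list_indent = None
--     return '\n'.join(out)
-- ===== Notes on version B (the rewrite author's own statement) =====
-- stated objective: simpler
-- what changed: Replaced A's nested index-driven while loops (outer loop plus an inner continuation-consuming loop) with a single for-loop over the lines that keeps the current list-item indent in one state variable.
import Mathlib
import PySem

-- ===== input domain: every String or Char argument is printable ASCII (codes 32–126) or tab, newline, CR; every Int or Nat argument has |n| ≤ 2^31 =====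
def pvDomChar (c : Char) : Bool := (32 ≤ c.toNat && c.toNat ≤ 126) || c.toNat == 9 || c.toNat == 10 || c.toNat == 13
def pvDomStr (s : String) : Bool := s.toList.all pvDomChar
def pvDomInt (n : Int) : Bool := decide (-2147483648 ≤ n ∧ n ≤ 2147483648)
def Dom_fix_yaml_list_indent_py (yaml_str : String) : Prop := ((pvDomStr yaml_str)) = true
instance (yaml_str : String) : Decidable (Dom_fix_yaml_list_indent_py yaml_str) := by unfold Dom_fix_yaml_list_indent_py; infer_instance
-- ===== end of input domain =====

-- B replaces A's nested index-driven while loops by a single pass holding the current list-item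
-- indent in a state variable (objective: simpler). Return values agree on all inputs.

-- ' ' * indent + '  ' + stripped  (shared trivial formatting helper)
def pvIndentLine (n : Nat) (stripped : List Char) : List Char :=
  List.replicate n ' ' ++ [' ', ' '] ++ stripped

-- ===== PORT A =====
-- inner while loop: consumes continuation lines, returns (emitted lines, remaining lines)
def pvAInner (ci : Nat) : List (List Char) → List (List Char) × List (List Char)
  | [] => ([], [])
  | l :: rest =>
    if PySem.Chars.strip l = [] then
      let p := pvAInner ci rest
      (l :: p.1, p.2)
    else
      let ns := PySem.Chars.lstrip l
      let ni := l.length - ns.length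
      if ni > ci ∧ ¬ PySem.Chars.startswith ns ['-', ' '] = true then
        let p := pvAInner ci rest
        (pvIndentLine ni ns :: p.1, p.2)
      else ([], l :: rest)

theorem pvAInner_snd_length (ci : Nat) (ls : List (List Char)) :
    (pvAInner ci ls).2.length ≤ ls.length := by
  induction ls with
  | nil => simp [pvAInner]
  | cons l rest ih =>
    simp only [pvAInner]
    split
    · simpa using Nat.le_succ_of_le ih
    · split
      · simpa using Nat.le_succ_of_le ih
      · simp

-- outer while loop
def pvAOuter : List (List Char) → List (List Char)
  | [] => []
  | l :: rest =>
    let s := PySem.Chars.lstrip l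
    if PySem.Chars.startswith s ['-', ' '] = true then
      let ci := l.length - s.length
      let p := pvAInner ci rest
      pvIndentLine ci s :: (p.1 ++ pvAOuter p.2)
    else l :: pvAOuter rest
termination_by ls => ls.length
decreasing_by
  · exact Nat.lt_succ_of_le (pvAInner_snd_length _ _)
  · simp

def fix_yaml_list_indent_py (yaml_str : String) : String :=
  String.ofList (PySem.Chars.join ['\n'] (pvAOuter (PySem.Chars.splitOn yaml_str.toList ['\n'])))

-- ===== PORT B =====
-- single pass; st = indent of the current list-item marker, none when not inside a list item
def pvBLoop (st : Option Nat) : List (List Char) → List (List Char)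
  | [] => []
  | l :: rest =>
    if PySem.Chars.strip l = [] then l :: pvBLoop st rest
    else
      let s := PySem.Chars.lstrip l
      let ind := l.length - s.length
      if PySem.Chars.startswith s ['-', ' '] = true then
        pvIndentLine ind s :: pvBLoop (some ind) rest
      else
        match st with
        | some ci =>
          if ind > ci then pvIndentLine ind s :: pvBLoop (some ci) rest
          else l :: pvBLoop none rest
        | none => l :: pvBLoop none rest

def fix_yaml_list_indent_py_alt (yaml_str : String) : String :=
  String.ofList (PySem.Chars.join ['\n'] (pvBLoop none (PySem.Chars.splitOn yaml_str.toList ['\n'])))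

-- ===== PRECONDITION & SPEC =====
def Spec_fix_yaml_list_indent_py (yaml_str : String) (out : String) : Prop := out = fix_yaml_list_indent_py_alt yaml_str
instance (yaml_str : String) (out : String) : Decidable (Spec_fix_yaml_list_indent_py yaml_str out) := by unfold Spec_fix_yaml_list_indent_py; infer_instance

-- ===== CLAIM (what is proved, stated in full; the proofs are below) =====
def Claim_equal_fix_yaml_list_indent_py : Prop := ∀ (yaml_str : String), Dom_fix_yaml_list_indent_py yaml_str → Spec_fix_yaml_list_indent_py yaml_str (fix_yaml_list_indent_py yaml_str)

-- ===== LEMMAS AND PROOFS =====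

theorem pvAOuter_nil : pvAOuter [] = [] := by rw [pvAOuter]

theorem pvAOuter_cons (l : List Char) (rest : List (List Char)) :
    pvAOuter (l :: rest) =
      (if PySem.Chars.startswith (PySem.Chars.lstrip l) ['-', ' '] = true then
        pvIndentLine (l.length - (PySem.Chars.lstrip l).length) (PySem.Chars.lstrip l) ::
          ((pvAInner (l.length - (PySem.Chars.lstrip l).length) rest).1 ++
            pvAOuter (pvAInner (l.length - (PySem.Chars.lstrip l).length) rest).2)
      else l :: pvAOuter rest) := by
  rw [pvAOuter]

-- a whitespace-only line has an empty lstrip (so it can never start with "- ")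
theorem pvLstrip_nil_of_strip_nil (l : List Char) (h : PySem.Chars.strip l = []) :
    PySem.Chars.lstrip l = [] := by
  simp [PySem.Chars.strip, PySem.Chars.rstrip, PySem.Chars.lstrip] at *
  intro x hx
  rw [← List.takeWhile_append_dropWhile (p := PySem.Chars.isspace) (l := l)] at hx
  rcases List.mem_append.1 hx with h1 | h1
  · exact List.mem_takeWhile_imp h1
  · exact h x h1

theorem pvStrip_ne_nil_of_startswith (l : List Char)
    (h : PySem.Chars.startswith (PySem.Chars.lstrip l) ['-', ' '] = true) :
    ¬ PySem.Chars.strip l = [] := by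
  intro hs
  rw [pvLstrip_nil_of_strip_nil l hs] at h
  rw [PySem.Chars.startswith_iff] at h
  simp at h

-- the main invariant: A's two nested loops equal B's one-pass state machine,
-- with A's inner loop (marker indent ci) corresponding to state `some ci`
theorem pvMain (n : Nat) : ∀ ls : List (List Char), ls.length ≤ n →
    pvAOuter ls = pvBLoop none ls ∧
      ∀ ci, (pvAInner ci ls).1 ++ pvAOuter (pvAInner ci ls).2 = pvBLoop (some ci) ls := by
  induction n with
  | zero =>
    intro ls hls
    rw [List.length_eq_zero_iff.1 (Nat.le_zero.1 hls)]
    exact ⟨pvAOuter_nil, fun _ => by simp [pvAInner, pvBLoop, pvAOuter_nil]⟩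
  | succ n ih =>
    intro ls hls
    cases ls with
    | nil => exact ⟨pvAOuter_nil, fun _ => by simp [pvAInner, pvBLoop, pvAOuter_nil]⟩
    | cons l rest =>
      have hr : rest.length ≤ n := by simpa using Nat.succ_le_succ_iff.1 hls
      constructor
      · -- outer loop step vs B with state none
        by_cases hsw : PySem.Chars.startswith (PySem.Chars.lstrip l) ['-', ' '] = true
        · have hblank := pvStrip_ne_nil_of_startswith l hsw
          simp [pvAOuter_cons, pvBLoop, hsw, hblank, (ih rest hr).2]
        · by_cases hb : PySem.Chars.strip l = []
          · simp [pvAOuter_cons, pvBLoop, hsw, hb, (ih rest hr).1]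
          · simp [pvAOuter_cons, pvBLoop, hsw, hb, (ih rest hr).1]
      · -- inner loop step vs B with state some ci
        intro ci
        by_cases hb : PySem.Chars.strip l = []
        · simp [pvAInner, pvBLoop, hb, (ih rest hr).2 ci]
        · by_cases hsw : PySem.Chars.startswith (PySem.Chars.lstrip l) ['-', ' '] = true
          · -- a new list item: A's inner loop breaks and the outer loop handles it
            simp [pvAInner, pvBLoop, hb, hsw, pvAOuter_cons, (ih rest hr).2]
          · by_cases hgt : l.length - (PySem.Chars.lstrip l).length > ci
            · -- continuation line
              simp [pvAInner, pvBLoop, hb, hsw, hgt, (ih rest hr).2 ci]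
            · -- dedented line: A's inner loop breaks, the outer loop emits it unchanged
              simp [pvAInner, pvBLoop, hb, hsw, hgt, pvAOuter_cons, (ih rest hr).1]

-- ===== VERDICT (by name: the statement is the Claim_ definition above) =====
theorem fix_yaml_list_indent_py_spec : Claim_equal_fix_yaml_list_indent_py := by
  intro yaml_str _
  unfold Spec_fix_yaml_list_indent_py fix_yaml_list_indent_py fix_yaml_list_indent_py_alt
  rw [(pvMain _ _ (Nat.le_refl _)).1]
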